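-- pv_equiv track=rewrite | github.com/AYON-ARYAN/Python-Code-Collection | BAP/CO3/Q1/Q3.py | q3
-- ===== SOURCE A (Python) =====
-- def q3(my_list):
--     dictionary = {'less': 0, 'more': 0}
--
--     for num in my_list:
--         if num <= 0:
--             dictionary['less'] += 1
--         else:
--             dictionary['more'] += 1
--
--     return dictionary
-- ===== SOURCE B (Python) =====
-- def q3(my_list):
--     items = sorted(my_list)
--     # binary search for the first index holding a positive number
--     lo, hi = 0, len(items)
--     while lo < hi:
--         mid = (lo + hi) // 2
--         if items[mid] <= 0:
--             lo = mid + 1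
--         else:
--             hi = mid
--     return {'less': lo, 'more': len(items) - lo}
-- ===== Notes on version B (the rewrite author's own statement) =====
-- stated objective: alternative
-- what changed: Instead of counting with a branching loop, B sorts the list and locates the less/more boundary by a hand-written binary search (first positive element in the sorted copy), deriving both counts from that index.
import Mathlib
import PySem

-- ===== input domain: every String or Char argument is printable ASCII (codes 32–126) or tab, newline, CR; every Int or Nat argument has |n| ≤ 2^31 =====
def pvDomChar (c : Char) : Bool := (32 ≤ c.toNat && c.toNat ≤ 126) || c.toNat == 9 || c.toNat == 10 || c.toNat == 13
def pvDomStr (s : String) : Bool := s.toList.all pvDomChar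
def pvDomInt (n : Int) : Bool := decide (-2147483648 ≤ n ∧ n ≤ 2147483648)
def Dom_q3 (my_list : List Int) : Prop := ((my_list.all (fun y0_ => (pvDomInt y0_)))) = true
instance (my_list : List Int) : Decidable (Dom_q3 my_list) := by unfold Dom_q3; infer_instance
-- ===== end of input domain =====

-- B sorts the list and finds the less/more boundary by binary search instead of counting in a loop (objective: alternative algorithm, not faster).

-- ===== PORT A =====
def q3 (my_list : List Int) : List (String × Int) :=
  (my_list.foldl
    (fun d num =>
      if num ≤ 0 then d.modify "less" 0 (· + 1) else d.modify "more" 0 (· + 1))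
    ((PySem.Dict.empty.insert "less" 0).insert "more" 0)).items

-- ===== PORT B =====
-- the while-loop binary search of Source B; items[mid] is always in range (0 ≤ lo ≤ mid < hi ≤ len),
-- so the Python indexing is ported as getD (exact on every reachable index)
def q3Bsearch (items : List Int) (lo hi : Nat) : Nat :=
  if _h : lo < hi then
    let mid := (lo + hi) / 2
    if items.getD mid 0 ≤ 0 then q3Bsearch items (mid + 1) hi
    else q3Bsearch items lo mid
  else lo
termination_by hi - lo
decreasing_by all_goals omega

def q3_alt (my_list : List Int) : List (String × Int) :=
  let items := PySem.List.sorted my_list (fun x => x) false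
  let lo := q3Bsearch items 0 items.length
  [("less", (lo : Int)), ("more", (items.length : Int) - (lo : Int))]

-- ===== PRECONDITION & SPEC =====
def Spec_q3 (my_list : List Int) (out : List (String × Int)) : Prop := out = q3_alt my_list
instance (my_list : List Int) (out : List (String × Int)) : Decidable (Spec_q3 my_list out) := by unfold Spec_q3; infer_instance

-- ===== CLAIM (what is proved, stated in full; the proofs are below) =====
def Claim_equal_q3 : Prop := ∀ (my_list : List Int), Dom_q3 my_list → Spec_q3 my_list (q3 my_list)

-- ===== LEMMAS AND PROOFS =====

lemma q3_loop (l : List Int) (a b : Int) :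
    l.foldl
      (fun d num =>
        if num ≤ 0 then d.modify "less" 0 (· + 1) else d.modify "more" 0 (· + 1))
      (PySem.Dict.mk [("less", a), ("more", b)]) =
    PySem.Dict.mk [("less", a + (l.countP (fun x => x ≤ 0) : Int)),
                   ("more", b + ((l.length : Int) - (l.countP (fun x => x ≤ 0) : Int)))] := by
  induction l generalizing a b with
  | nil => simp
  | cons x xs ih =>
    by_cases hx : x ≤ 0
    · rw [List.foldl_cons, if_pos hx,
        show (PySem.Dict.mk [("less", a), ("more", b)]).modify "less" 0 (· + 1)
            = PySem.Dict.mk [("less", a + 1), ("more", b)] by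
          simp [PySem.Dict.modify, PySem.Dict.contains, PySem.Dict.insert, PySem.Dict.getD, PySem.Dict.get?],
        ih]
      simp [hx]
      omega
    · rw [List.foldl_cons, if_neg hx,
        show (PySem.Dict.mk [("less", a), ("more", b)]).modify "more" 0 (· + 1)
            = PySem.Dict.mk [("less", a), ("more", b + 1)] by
          simp [PySem.Dict.modify, PySem.Dict.contains, PySem.Dict.insert, PySem.Dict.getD, PySem.Dict.get?],
        ih]
      simp [hx]
      omega

-- on a sorted list, an index holding a non-positive value is below the non-positive count
lemma count_gt_of_nonpos (s : List Int) (hs : s.Pairwise (· ≤ ·)) (m : Nat)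
    (hm : m < s.length) (h : s[m] ≤ 0) :
    m < s.countP (fun x => x ≤ 0) := by
  have hsplit := List.take_append_drop (m + 1) s
  have htake : (s.take (m + 1)).countP (fun x => x ≤ 0) = (s.take (m + 1)).length := by
    rw [List.countP_eq_length]
    intro a ha
    rw [List.mem_iff_getElem] at ha
    obtain ⟨i, hi, rfl⟩ := ha
    have hmin : (s.take (m + 1)).length = min (m + 1) s.length := List.length_take
    have hilen : i < s.length := by omega
    have him : i ≤ m := by omega
    rw [List.getElem_take]
    have hle : s[i] ≤ s[m] := by
      rcases Nat.lt_or_ge i m with hlt | hge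
      · exact (List.pairwise_iff_getElem.mp hs) i m hilen hm hlt
      · have : i = m := by omega
        subst this; exact le_refl _
    simpa using le_trans hle h
  have hlen : (s.take (m + 1)).length = m + 1 := by
    have : (s.take (m + 1)).length = min (m + 1) s.length := List.length_take
    omega
  calc m < (s.take (m + 1)).countP (fun x => x ≤ 0) := by omega
    _ ≤ s.countP (fun x => x ≤ 0) := by
        conv_rhs => rw [← hsplit]
        rw [List.countP_append]; omega

-- on a sorted list, an index holding a positive value bounds the non-positive count
lemma count_le_of_pos (s : List Int) (hs : s.Pairwise (· ≤ ·)) (m : Nat)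
    (hm : m < s.length) (h : ¬ s[m] ≤ 0) :
    s.countP (fun x => x ≤ 0) ≤ m := by
  have hsplit := List.take_append_drop m s
  have hdrop : (s.drop m).countP (fun x => x ≤ 0) = 0 := by
    rw [List.countP_eq_zero]
    intro a ha
    rw [List.mem_iff_getElem] at ha
    obtain ⟨j, hj, rfl⟩ := ha
    have hjlen : m + j < s.length := by
      have : (s.drop m).length = s.length - m := List.length_drop
      omega
    rw [List.getElem_drop]
    have hle : s[m] ≤ s[m + j] := by
      rcases Nat.eq_or_lt_of_le (Nat.le_add_right m j) with heq | hlt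
      · simp [← heq]
      · exact (List.pairwise_iff_getElem.mp hs) m (m + j) hm hjlen hlt
    simp only [decide_eq_true_eq] at *
    omega
  have htake : (s.take m).countP (fun x => x ≤ 0) ≤ m := by
    have h1 : (s.take m).countP (fun x => x ≤ 0) ≤ (s.take m).length := List.countP_le_length
    have h2 : (s.take m).length = min m s.length := List.length_take
    omega
  conv_lhs => rw [← hsplit]
  rw [List.countP_append]; omega

-- the binary search converges to the non-positive count when it brackets it
lemma q3Bsearch_eq (s : List Int) (hs : s.Pairwise (· ≤ ·)) :
    ∀ (n lo hi : Nat), hi - lo ≤ n → hi ≤ s.length →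
      lo ≤ s.countP (fun x => x ≤ 0) → s.countP (fun x => x ≤ 0) ≤ hi →
      q3Bsearch s lo hi = s.countP (fun x => x ≤ 0) := by
  intro n
  induction n with
  | zero =>
    intro lo hi hn hlen hlo hhi
    rw [q3Bsearch, dif_neg (by omega)]
    omega
  | succ k ih =>
    intro lo hi hn hlen hlo hhi
    by_cases h : lo < hi
    · rw [q3Bsearch, dif_pos h]
      show (if s.getD ((lo + hi) / 2) 0 ≤ 0 then q3Bsearch s ((lo + hi) / 2 + 1) hi
            else q3Bsearch s lo ((lo + hi) / 2)) = s.countP (fun x => x ≤ 0)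
      have hmidlt : (lo + hi) / 2 < hi := by omega
      have hmidge : lo ≤ (lo + hi) / 2 := by omega
      have hmlen : (lo + hi) / 2 < s.length := by omega
      rw [List.getD_eq_getElem s 0 hmlen]
      by_cases hv : s[(lo + hi) / 2] ≤ 0
      · rw [if_pos hv]
        exact ih ((lo + hi) / 2 + 1) hi (by omega) hlen
          (count_gt_of_nonpos s hs _ hmlen hv) hhi
      · rw [if_neg hv]
        exact ih lo ((lo + hi) / 2) (by omega) (by omega) hlo
          (count_le_of_pos s hs _ hmlen hv)
    · rw [q3Bsearch, dif_neg h]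
      omega

-- ===== VERDICT (by name: the statement is the Claim_ definition above) =====
theorem q3_spec : Claim_equal_q3 := by
  intro l _
  show q3 l = q3_alt l
  unfold q3
  simp only [q3_alt]
  rw [show ((PySem.Dict.empty.insert "less" (0:Int)).insert "more" 0) =
        PySem.Dict.mk [("less", 0), ("more", 0)] from rfl, q3_loop]
  have hperm : (PySem.List.sorted l (fun x => x) false).Perm l := PySem.List.sorted_perm l _ _
  have hpw : (PySem.List.sorted l (fun x => x) false).Pairwise (· ≤ ·) := by
    have := PySem.List.sorted_pairwise (xs := l) (key := fun x => x)
    simpa using this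
  have hcount : (PySem.List.sorted l (fun x => x) false).countP (fun x => x ≤ 0)
      = l.countP (fun x => x ≤ 0) := hperm.countP_eq _
  have hlen : (PySem.List.sorted l (fun x => x) false).length = l.length := hperm.length_eq
  rw [q3Bsearch_eq (PySem.List.sorted l (fun x => x) false) hpw
        (PySem.List.sorted l (fun x => x) false).length 0
        (PySem.List.sorted l (fun x => x) false).length
        (by omega) (le_refl _) (Nat.zero_le _) List.countP_le_length]
  rw [hcount, hlen]
  simp
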